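-- pv_equiv track=rewrite | github.com/NolieRavioli/python | eveCode/PICode/test.py | determine_levels
-- ===== SOURCE A (Python) =====
-- def determine_levels(schematics):
--     # Create a mapping of outputs to their respective schematics
--     output_map = {s['output'][0]: s for s in schematics}
--     levels = {}
--
--     # Recursive function to calculate the level of a product
--     def get_level(type_id):
--         if type_id not in output_map:
--             return 0  # Raw material
--
--         if type_id in levels:
--             return levels[type_id]  # Already calculated
--
--         schematic = output_map[type_id]
--         max_input_level = max(get_level(input_id) for input_id in schematic['inputs'])
--
--         levels[type_id] = max_input_level + 1
--         return levels[type_id]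
--
--     # Calculate levels for all schematics
--     for schematic in schematics:
--         output_type_id = schematic['output'][0]
--         get_level(output_type_id)
--
--     return levels
-- ===== SOURCE B (Python) =====
-- def determine_levels(schematics):
--     # Same output_map; levels computed by an explicit-stack post-order DFS
--     # instead of A's recursive helper.
--     output_map = {s['output'][0]: s for s in schematics}
--     levels = {}
--     for schematic in schematics:
--         stack = [schematic['output'][0]]
--         while stack:
--             t = stack[-1]
--             if t not in output_map or t in levels:
--                 stack.pop()
--                 continue
--             inputs = output_map[t]['inputs']
--             pending = [i for i in inputs if i in output_map and i not in levels]
--             if pending: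
--                 stack.extend(reversed(pending))
--             else:
--                 levels[t] = 1 + max(levels[i] if i in output_map else 0 for i in inputs)
--                 stack.pop()
--     return levels
-- ===== Notes on version B (the rewrite author's own statement) =====
-- stated objective: alternative
-- what changed: Replaces A's recursive memoized helper (closure over levels, recursion per dependency) by an explicit-stack post-order DFS: a while-loop pushes a node's unresolved inputs and resolves a node once all its inputs are cached, producing the identical levels dict in the identical insertion order.
import Mathlib
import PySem

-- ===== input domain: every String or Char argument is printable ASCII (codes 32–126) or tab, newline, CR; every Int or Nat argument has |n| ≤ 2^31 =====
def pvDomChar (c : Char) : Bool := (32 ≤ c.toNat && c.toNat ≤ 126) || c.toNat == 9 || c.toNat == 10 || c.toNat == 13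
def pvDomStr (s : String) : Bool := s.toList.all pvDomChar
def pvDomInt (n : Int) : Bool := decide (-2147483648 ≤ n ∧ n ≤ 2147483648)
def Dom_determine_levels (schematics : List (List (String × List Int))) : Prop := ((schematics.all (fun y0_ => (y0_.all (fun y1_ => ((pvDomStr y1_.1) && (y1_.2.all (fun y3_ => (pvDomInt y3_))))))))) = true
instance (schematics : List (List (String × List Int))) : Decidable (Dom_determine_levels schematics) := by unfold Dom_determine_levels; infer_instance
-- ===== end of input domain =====

-- B replaces A's recursive memoized helper by an explicit-stack post-order DFS (same values,
-- same insertion order); equivalence is proved on well-formed acyclic inputs (Pre_ below).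

-- ===== PORT A =====
-- s['output'][0]  (missing key / empty list raise in Python; excluded by Pre_, default never
-- reached inside Pre_)
def pvOutKey (s : List (String × List Int)) : Int :=
  match List.lookup "output" s with
  | some (x :: _) => x
  | _ => 0

-- s['inputs']  (missing key raises KeyError in Python; excluded by Pre_ for consulted entries)
def pvIns (s : List (String × List Int)) : List Int :=
  (List.lookup "inputs" s).getD []

-- output_map = {s['output'][0]: s for s in schematics}
def pvOutputMap (schematics : List (List (String × List Int))) :
    PySem.Dict Int (List (String × List Int)) :=
  schematics.foldl (fun d s => d.insert (pvOutKey s) s) PySem.Dict.empty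

-- output_map[t]['inputs'] ([] when t is no key; only consulted when it is)
def pvInsOf (om : PySem.Dict Int (List (String × List Int))) (t : Int) : List Int :=
  match om.get? t with
  | some s => pvIns s
  | none => []

-- A's recursive get_level, with a fuel argument for termination (fuel exhaustion is
-- unreachable under Pre_: on acyclic data the recursion depth is < number of keys + 2).
-- max(get_level(i) for i in inputs) is the threaded running max over the inputs.
def pvGetLevel (om : PySem.Dict Int (List (String × List Int))) :
    Nat → PySem.Dict Int Int → Int → PySem.Dict Int Int × Int
  | 0, lv, _ => (lv, 0)
  | fuel+1, lv, t =>
    if (om.get? t).isNone then (lv, 0)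
    else
      match lv.get? t with
      | some v => (lv, v)
      | none =>
        let p := (pvInsOf om t).foldl
          (fun (q : PySem.Dict Int Int × Option Int) i =>
            let r := pvGetLevel om fuel q.1 i
            (r.1, some (max ((q.2).getD r.2) r.2)))
          (lv, none)
        let m := p.2.getD 0 + 1
        (p.1.insert t m, m)

def determine_levels (schematics : List (List (String × List Int))) : List (Int × Int) :=
  let om := pvOutputMap schematics
  (schematics.foldl
    (fun lv s => (pvGetLevel om (schematics.length + 2) lv (pvOutKey s)).1)
    PySem.Dict.empty).items

-- ===== PORT B =====
-- B's while-loop over an explicit stack (head of the list = top of the Python stack, so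
-- stack.extend(reversed(pending)) is 'pending ++ stack').  Fuel makes the loop structural;
-- exhaustion is unreachable under Pre_ (the bound pvFuelB below is proved sufficient).
def pvRunStack (om : PySem.Dict Int (List (String × List Int))) :
    Nat → PySem.Dict Int Int → List Int → PySem.Dict Int Int
  | _, lv, [] => lv
  | 0, lv, _ => lv
  | fuel+1, lv, t :: rest =>
    if (om.get? t).isNone || (lv.get? t).isSome then
      pvRunStack om fuel lv rest
    else
      let ins := pvInsOf om t
      let pending := ins.filter (fun i => (om.get? i).isSome && (lv.get? i).isNone)
      if pending.isEmpty then
        let m := (PySem.List.max?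
            (ins.map (fun i => if (om.get? i).isSome then lv.getD i 0 else 0))
            (fun y => y)).getD 0
        pvRunStack om fuel (lv.insert t (m + 1)) rest
      else
        pvRunStack om fuel lv (pending ++ t :: rest)

def pvFuelB (schematics : List (List (String × List Int))) : Nat :=
  (2 + (schematics.map (fun s => (pvIns s).length)).sum) ^ (schematics.length + 2)

def determine_levels_alt (schematics : List (List (String × List Int))) : List (Int × Int) :=
  let om := pvOutputMap schematics
  (schematics.foldl
    (fun lv s => pvRunStack om (pvFuelB schematics) lv [pvOutKey s])
    PySem.Dict.empty).items

-- ===== PRECONDITION & SPEC =====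
-- one peeling round: keep the keys that still have an input among the remaining keys
def pvPeel (om : PySem.Dict Int (List (String × List Int))) (rem : List Int) : List Int :=
  rem.filter (fun k => (pvInsOf om k).any (fun i => rem.contains i))

def pvRemaining (om : PySem.Dict Int (List (String × List Int))) (keys : List Int) :
    Nat → List Int
  | 0 => keys
  | n+1 => pvPeel om (pvRemaining om keys n)

-- Pre_ excludes exactly the inputs on which the Python A raises: a schematic without an
-- 'output' key or with an empty output list (KeyError/IndexError), a consulted schematic
-- without a nonempty 'inputs' list (KeyError/ValueError from max of an empty sequence),
-- and cyclic dependency graphs (RecursionError); acyclicity is stated by iterated removal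
-- of keys none of whose inputs is still a remaining key.
def Pre_determine_levels (schematics : List (List (String × List Int))) : Prop :=
  (∀ s ∈ schematics, ((List.lookup "output" s).getD []) ≠ []) ∧
  (∀ k ∈ (pvOutputMap schematics).keys, pvInsOf (pvOutputMap schematics) k ≠ []) ∧
  pvRemaining (pvOutputMap schematics) (pvOutputMap schematics).keys
      (pvOutputMap schematics).keys.length = []

instance (schematics : List (List (String × List Int))) :
    Decidable (Pre_determine_levels schematics) := by
  unfold Pre_determine_levels; infer_instance

def pvWitness_determine_levels : (List (List (String × List Int))) :=
  [[("output", [1]), ("inputs", [2])]]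

def Spec_determine_levels (schematics : List (List (String × List Int)))
    (out : List (Int × Int)) : Prop := out = determine_levels_alt schematics

instance (schematics : List (List (String × List Int))) (out : List (Int × Int)) :
    Decidable (Spec_determine_levels schematics out) := by
  unfold Spec_determine_levels; infer_instance

-- ===== CLAIM (what is proved, stated in full; the proofs are below) =====
def Claim_equal_determine_levels : Prop :=
  ∀ (schematics : List (List (String × List Int))), Dom_determine_levels schematics →
    Pre_determine_levels schematics →
    Spec_determine_levels schematics (determine_levels schematics)

-- ===== LEMMAS AND PROOFS =====
-- Abbreviation for the output-map type (proof-side convenience only)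
abbrev pvOMT : Type := PySem.Dict Int (List (String × List Int))

-- ---- the peeling chain and the rank of a node ----

theorem pvRem_succ (om : pvOMT) (ks : List Int) (r : Nat) :
    pvRemaining om ks (r+1) = pvPeel om (pvRemaining om ks r) := rfl

theorem pvRem_mono (om : pvOMT) (ks : List Int) (k : Int) (r : Nat)
    (h : k ∈ pvRemaining om ks (r+1)) : k ∈ pvRemaining om ks r := by
  rw [pvRem_succ] at h
  exact List.mem_of_mem_filter h

theorem pvRem_mono_le (om : pvOMT) (ks : List Int) (k : Int) {s r : Nat} (hsr : s ≤ r)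
    (h : k ∈ pvRemaining om ks r) : k ∈ pvRemaining om ks s := by
  induction r with
  | zero => simpa [Nat.le_zero.mp hsr] using h
  | succ r ih =>
    rcases Nat.lt_or_ge s (r+1) with hlt | hge
    · exact ih (Nat.lt_succ_iff.mp hlt) (pvRem_mono om ks k r h)
    · have : s = r+1 := le_antisymm hsr hge
      simpa [this] using h

-- pvHex om: every node eventually leaves the peeling chain (consequence of Pre_)
def pvHex (om : pvOMT) : Prop :=
  ∀ k : Int, ∃ r, ((pvRemaining om (PySem.Dict.keys om) r).contains k) = false

def pvRank (om : pvOMT) (hex : pvHex om) (k : Int) : Nat := Nat.find (hex k)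

theorem pvRank_lt_iff (om : pvOMT) (hex : pvHex om) (k : Int) (r : Nat) :
    r < pvRank om hex k ↔ k ∈ pvRemaining om om.keys r := by
  rw [pvRank, Nat.lt_find_iff]
  constructor
  · intro h
    have := h r le_rfl
    simpa using this
  · intro hmem m hm
    simp only [Bool.not_eq_false, List.contains_iff_mem]
    exact pvRem_mono_le om om.keys k hm hmem

theorem pvRank_pos (om : pvOMT) (hex : pvHex om) (k : Int) (h : k ∈ om.keys) :
    0 < pvRank om hex k := by
  rw [pvRank_lt_iff]
  simpa [pvRemaining] using h

theorem pvRank_le (om : pvOMT) (hex : pvHex om)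
    (hN : pvRemaining om om.keys om.keys.length = []) (k : Int) :
    pvRank om hex k ≤ om.keys.length := by
  by_contra h
  have := (pvRank_lt_iff om hex k om.keys.length).mp (Nat.lt_of_not_le h)
  simp [hN] at this

theorem pvRank_edge (om : pvOMT) (hex : pvHex om) (t i : Int)
    (ht : t ∈ om.keys) (hi : i ∈ pvInsOf om t) :
    pvRank om hex i < pvRank om hex t := by
  rw [pvRank_lt_iff]
  -- t survives every round up to pvRank i, since its input i is still remaining
  have key : ∀ r, r ≤ pvRank om hex i → t ∈ pvRemaining om om.keys r := by
    intro r
    induction r with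
    | zero => intro _; simpa [pvRemaining] using ht
    | succ r ih =>
      intro hr
      have htr : t ∈ pvRemaining om om.keys r := ih (Nat.le_of_succ_le hr)
      have hir : i ∈ pvRemaining om om.keys r :=
        (pvRank_lt_iff om hex i r).mp (Nat.lt_of_succ_le hr)
      rw [pvRem_succ, pvPeel, List.mem_filter]
      refine ⟨htr, ?_⟩
      simp only [List.any_eq_true]
      exact ⟨i, hi, by simpa [List.contains_iff_mem] using hir⟩
  exact key _ le_rfl

theorem pvKey_iff (om : pvOMT) (t : Int) :
    ((om.get? t).isSome = true) ↔ t ∈ om.keys := by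
  rcases h : om.get? t with _ | v
  · simp only [Option.isSome_none]
    have := (PySem.Dict.get?_eq_none_iff_not_mem_keys (d := om) (k := t)).mp h
    simp [this]
  · simp only [Option.isSome_some]
    have : ¬ om.get? t = none := by simp [h]
    have hm := (PySem.Dict.get?_eq_none_iff_not_mem_keys (d := om) (k := t)).not.mp this
    simp at hm
    simp [hm]

-- ---- the intrinsic level function ----

def pvMaxL (l : List Int) : Int := (PySem.List.max? l (fun y => y)).getD 0

def pvL (om : pvOMT) : Nat → Int → Int
  | 0, _ => 0
  | n+1, t =>
    if (om.get? t).isNone then 0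
    else 1 + pvMaxL ((pvInsOf om t).map (pvL om n))

def pvLvl (om : pvOMT) (t : Int) : Int := pvL om (om.keys.length + 1) t

theorem pvL_nonkey (om : pvOMT) (n : Nat) (t : Int) (h : om.get? t = none) :
    pvL om n t = 0 := by
  cases n <;> simp [pvL, h]

theorem pvL_stab (om : pvOMT) (hex : pvHex om) :
    ∀ n t, pvRank om hex t ≤ n → ∀ r s, pvRank om hex t < r → pvRank om hex t < s →
      pvL om r t = pvL om s t := by
  intro n
  induction n with
  | zero =>
    intro t hrk r s hr hs
    -- rank t = 0, so t is not a key (keys have positive rank)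
    have h0 : pvRank om hex t = 0 := Nat.le_zero.mp hrk
    rcases h : om.get? t with _ | v
    · rw [pvL_nonkey om r t h, pvL_nonkey om s t h]
    · have ht : t ∈ om.keys := (pvKey_iff om t).mp (by simp [h])
      have := pvRank_pos om hex t ht
      omega
  | succ n ih =>
    intro t hrk r s hr hs
    rcases h : om.get? t with _ | v
    · rw [pvL_nonkey om r t h, pvL_nonkey om s t h]
    · have ht : t ∈ om.keys := (pvKey_iff om t).mp (by simp [h])
      obtain ⟨r', rfl⟩ : ∃ r', r = r' + 1 := ⟨r - 1, by omega⟩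
      obtain ⟨s', rfl⟩ : ∃ s', s = s' + 1 := ⟨s - 1, by omega⟩
      simp only [pvL, h, Option.isNone_some, Bool.false_eq_true, if_false]
      have hmap : (pvInsOf om t).map (pvL om r') = (pvInsOf om t).map (pvL om s') := by
        apply List.map_congr_left
        intro i hi
        rcases hik : om.get? i with _ | w
        · rw [pvL_nonkey om r' i hik, pvL_nonkey om s' i hik]
        · have hlt : pvRank om hex i < pvRank om hex t := pvRank_edge om hex t i ht hi
          exact ih i (by omega) r' s' (by omega) (by omega)
      rw [hmap]

theorem pvLvl_nonkey (om : pvOMT) (t : Int) (h : om.get? t = none) : pvLvl om t = 0 :=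
  pvL_nonkey om _ t h

theorem pvLvl_eq (om : pvOMT) (hex : pvHex om)
    (hN : pvRemaining om om.keys om.keys.length = []) (t : Int) (ht : t ∈ om.keys) :
    pvLvl om t = 1 + pvMaxL ((pvInsOf om t).map (pvLvl om)) := by
  have hk : (om.get? t).isSome = true := (pvKey_iff om t).mpr ht
  rcases h : om.get? t with _ | v
  · rw [h] at hk; simp at hk
  · have hmap : (pvInsOf om t).map (pvL om om.keys.length) = (pvInsOf om t).map (pvLvl om) := by
      apply List.map_congr_left
      intro i hi
      rcases hik : om.get? i with _ | w
      · rw [pvL_nonkey om _ i hik, pvLvl_nonkey om i hik]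
      · have hlt : pvRank om hex i < pvRank om hex t := pvRank_edge om hex t i ht hi
        have hle : pvRank om hex t ≤ om.keys.length := pvRank_le om hex hN t
        exact pvL_stab om hex _ i le_rfl _ _ (by omega) (by omega)
    show pvL om (om.keys.length + 1) t = _
    simp only [pvL, h, Option.isNone_some, Bool.false_eq_true, if_false]
    rw [hmap]

-- ---- the running max of A's generator ----

theorem pvRunMax_some (l : List Int) (x : Int) :
    l.foldl (fun a v => some (max (a.getD v) v)) (some x) = some (l.foldl max x) := by
  induction l generalizing x with
  | nil => rfl
  | cons y l ih => simpa using ih (max x y)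

theorem pvRunMax_none (l : List Int) :
    (l.foldl (fun a v => some (max (a.getD v) v)) none).getD 0 = pvMaxL l := by
  cases l with
  | nil => rfl
  | cons y l =>
    simp only [List.foldl_cons, Option.getD_none, max_self]
    rw [pvRunMax_some, pvMaxL, PySem.List.max?_id_cons]

-- ---- dictionary invariants ----

def pvExt (a b : PySem.Dict Int Int) : Prop :=
  ∀ k v, a.get? k = some v → b.get? k = some v

theorem pvExt_refl (a : PySem.Dict Int Int) : pvExt a a := fun _ _ h => h

theorem pvExt_trans {a b c : PySem.Dict Int Int} (h1 : pvExt a b) (h2 : pvExt b c) :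
    pvExt a c := fun k v h => h2 k v (h1 k v h)

-- every cached value is the intrinsic level of a key
def pvInv (om : pvOMT) (lv : PySem.Dict Int Int) : Prop :=
  ∀ k v, lv.get? k = some v → (om.get? k).isSome = true ∧ v = pvLvl om k

theorem pvInv_insert (om : pvOMT) (lv : PySem.Dict Int Int) (t : Int)
    (hinv : pvInv om lv) (hk : (om.get? t).isSome = true) :
    pvInv om (lv.insert t (pvLvl om t)) := by
  intro k v h
  rw [PySem.Dict.get?_insert] at h
  by_cases hkt : k = t
  · subst hkt
    simp at h
    exact ⟨hk, by omega⟩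
  · simp only [if_neg hkt] at h
    exact hinv k v h

theorem pvExt_insert (lv : PySem.Dict Int Int) (t : Int) (w : Int)
    (h : lv.get? t = none) : pvExt lv (lv.insert t w) := by
  intro k v hk
  rw [PySem.Dict.get?_insert]
  by_cases hkt : k = t
  · rw [hkt] at hk; rw [hk] at h; cases h
  · simp [hkt, hk]

-- ---- one-step unfolding of port A's recursion ----

def pvPairStep (om : pvOMT) (f : Nat) (q : PySem.Dict Int Int × Option Int) (i : Int) :
    PySem.Dict Int Int × Option Int :=
  let r := pvGetLevel om f q.1 i
  (r.1, some (max ((q.2).getD r.2) r.2))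

def pvStep1 (om : pvOMT) (f : Nat) (lv : PySem.Dict Int Int) (i : Int) :
    PySem.Dict Int Int := (pvGetLevel om f lv i).1

theorem pvGetLevel_nonkey (om : pvOMT) (f : Nat) (lv : PySem.Dict Int Int) (t : Int)
    (hf : 0 < f) (h : om.get? t = none) : pvGetLevel om f lv t = (lv, 0) := by
  obtain ⟨f', rfl⟩ : ∃ f', f = f' + 1 := ⟨f - 1, by omega⟩
  simp [pvGetLevel, h]

theorem pvGetLevel_cached (om : pvOMT) (f : Nat) (lv : PySem.Dict Int Int) (t v : Int)
    (hf : 0 < f) (hk : (om.get? t).isSome = true) (h : lv.get? t = some v) :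
    pvGetLevel om f lv t = (lv, v) := by
  obtain ⟨f', rfl⟩ : ∃ f', f = f' + 1 := ⟨f - 1, by omega⟩
  have hn : (om.get? t).isNone = false := by
    rcases hw : om.get? t with _ | w
    · rw [hw] at hk; simp at hk
    · simp
  simp [pvGetLevel, hn, h]

theorem pvGetLevel_noop (om : pvOMT) (f : Nat) (lv : PySem.Dict Int Int) (t : Int)
    (hf : 0 < f) (h : om.get? t = none ∨ (lv.get? t).isSome = true) :
    (pvGetLevel om f lv t).1 = lv := by
  rcases h with h | h
  · rw [pvGetLevel_nonkey om f lv t hf h]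
  · rcases hv : lv.get? t with _ | v
    · rw [hv] at h; simp at h
    · rcases hw : om.get? t with _ | w
      · rw [pvGetLevel_nonkey om f lv t hf hw]
      · rw [pvGetLevel_cached om f lv t v hf (by simp [hw]) hv]

theorem pvGetLevel_uncached (om : pvOMT) (f : Nat) (lv : PySem.Dict Int Int) (t : Int)
    (hk : (om.get? t).isSome = true) (h : lv.get? t = none) :
    pvGetLevel om (f+1) lv t =
      (((pvInsOf om t).foldl (pvPairStep om f) (lv, none)).1.insert t
          ((((pvInsOf om t).foldl (pvPairStep om f) (lv, none)).2).getD 0 + 1),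
        (((pvInsOf om t).foldl (pvPairStep om f) (lv, none)).2).getD 0 + 1) := by
  have hn : (om.get? t).isNone = false := by
    rcases hw : om.get? t with _ | w
    · rw [hw] at hk; simp at hk
    · simp
  simp only [pvGetLevel, hn, Bool.false_eq_true, if_false, h]
  rfl

-- ---- the characterization of pvGetLevel ----

def pvGA (om : pvOMT) (hex : pvHex om) (lv : PySem.Dict Int Int)
    (p : PySem.Dict Int Int × Int) (t : Int) : Prop :=
  p.2 = pvLvl om t ∧ pvExt lv p.1 ∧ pvInv om p.1 ∧
  ((om.get? t).isSome = true → p.1.get? t = some (pvLvl om t)) ∧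
  (∀ k, lv.get? k = none → (p.1.get? k).isSome = true →
    pvRank om hex k ≤ pvRank om hex t)

-- the inner fold of the uncached-key case, given the induction hypothesis for the inputs
theorem pvGAfold (om : pvOMT) (hex : pvHex om) (f : Nat) (L0 : List Int)
    (HIf : ∀ i ∈ L0, ∀ lv, pvInv om lv → pvGA om hex lv (pvGetLevel om f lv i) i)
    (R0 : Nat) (hrk : ∀ i ∈ L0, pvRank om hex i < R0) :
    ∀ lv0 acc0, pvInv om lv0 →
      (L0.foldl (pvPairStep om f) (lv0, acc0)).1 = L0.foldl (pvStep1 om f) lv0 ∧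
      (L0.foldl (pvPairStep om f) (lv0, acc0)).2 =
        (L0.map (pvLvl om)).foldl (fun a v => some (max (a.getD v) v)) acc0 ∧
      pvExt lv0 (L0.foldl (pvStep1 om f) lv0) ∧
      pvInv om (L0.foldl (pvStep1 om f) lv0) ∧
      (∀ k, lv0.get? k = none →
        (((L0.foldl (pvStep1 om f) lv0)).get? k).isSome = true → pvRank om hex k < R0) := by
  induction L0 with
  | nil =>
    intro lv0 acc0 hinv
    exact ⟨rfl, rfl, pvExt_refl lv0, hinv, fun k h1 h2 => by
      simp only [List.foldl_nil] at h2; rw [h1] at h2; cases h2⟩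
  | cons i L ih =>
    intro lv0 acc0 hinv
    have hga := HIf i (List.mem_cons_self) lv0 hinv
    obtain ⟨hval, hext, hinv', _, hnew⟩ := hga
    have ihr := ih (fun j hj lv h => HIf j (List.mem_cons_of_mem i hj) lv h)
      (fun j hj => hrk j (List.mem_cons_of_mem i hj))
      (pvGetLevel om f lv0 i).1
      (some (max (acc0.getD (pvGetLevel om f lv0 i).2) (pvGetLevel om f lv0 i).2)) hinv'
    obtain ⟨e1, e2, hext2, hinv2, hnew2⟩ := ihr
    refine ⟨?_, ?_, pvExt_trans hext hext2, hinv2, ?_⟩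
    · simpa [pvPairStep, pvStep1] using e1
    · rw [List.foldl_cons, List.map_cons, List.foldl_cons]
      show (L.foldl (pvPairStep om f) (pvPairStep om f (lv0, acc0) i)).2 = _
      rw [show pvPairStep om f (lv0, acc0) i =
        ((pvGetLevel om f lv0 i).1,
          some (max (acc0.getD (pvGetLevel om f lv0 i).2) (pvGetLevel om f lv0 i).2)) from rfl]
      rw [e2, hval]
    · intro k h1 h2
      rw [List.foldl_cons] at h2
      rcases hmid : (pvGetLevel om f lv0 i).1.get? k with _ | w
      · have := hnew2 k hmid (by
          show ((L.foldl (pvStep1 om f) (pvStep1 om f lv0 i)).get? k).isSome = true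
          simpa [pvStep1] using h2)
        exact this
      · have hk := hnew k h1 (by simp [hmid])
        exact Nat.lt_of_le_of_lt hk (hrk i List.mem_cons_self)

theorem pvGA_all (om : pvOMT) (hex : pvHex om)
    (hN : pvRemaining om om.keys om.keys.length = []) :
    ∀ n t, pvRank om hex t ≤ n → ∀ fuel lv, pvInv om lv →
      pvRank om hex t + 2 ≤ fuel → pvGA om hex lv (pvGetLevel om fuel lv t) t := by
  intro n
  induction n with
  | zero =>
    intro t hn fuel lv hinv hfuel
    rcases hw : om.get? t with _ | s
    · rw [pvGetLevel_nonkey om fuel lv t (by omega) hw]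
      refine ⟨(pvLvl_nonkey om t hw).symm, pvExt_refl lv, hinv, ?_, ?_⟩
      · intro h; rw [hw] at h; simp at h
      · intro k h1 h2; rw [show ((lv, (0:Int)).1) = lv from rfl, h1] at h2; simp at h2
    · have ht : t ∈ om.keys := (pvKey_iff om t).mp (by simp [hw])
      have := pvRank_pos om hex t ht
      omega
  | succ n ih =>
    intro t hn fuel lv hinv hfuel
    rcases hw : om.get? t with _ | s
    · rw [pvGetLevel_nonkey om fuel lv t (by omega) hw]
      refine ⟨(pvLvl_nonkey om t hw).symm, pvExt_refl lv, hinv, ?_, ?_⟩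
      · intro h; rw [hw] at h; simp at h
      · intro k h1 h2; rw [show ((lv, (0:Int)).1) = lv from rfl, h1] at h2; simp at h2
    · have hkk : (om.get? t).isSome = true := by simp [hw]
      have ht : t ∈ om.keys := (pvKey_iff om t).mp hkk
      rcases hv : lv.get? t with _ | v
      · -- uncached key: unfold and use the fold lemma
        obtain ⟨f', rfl⟩ : ∃ f', fuel = f' + 1 := ⟨fuel - 1, by omega⟩
        rw [pvGetLevel_uncached om f' lv t hkk hv]
        have HIf : ∀ i ∈ pvInsOf om t, ∀ lv1, pvInv om lv1 →
            pvGA om hex lv1 (pvGetLevel om f' lv1 i) i := by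
          intro i hi lv1 hinv1
          have hlt : pvRank om hex i < pvRank om hex t := pvRank_edge om hex t i ht hi
          exact ih i (by omega) f' lv1 hinv1 (by omega)
        have hrk : ∀ i ∈ pvInsOf om t, pvRank om hex i < pvRank om hex t :=
          fun i hi => pvRank_edge om hex t i ht hi
        obtain ⟨e1, e2, hext, hinv', hnew⟩ :=
          pvGAfold om hex f' (pvInsOf om t) HIf (pvRank om hex t) hrk lv (none) hinv
        have hm : (((pvInsOf om t).foldl (pvPairStep om f') (lv, none)).2).getD 0 + 1
            = pvLvl om t := by
          rw [e2, pvRunMax_none, pvLvl_eq om hex hN t ht]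
          omega
        set lvF := (pvInsOf om t).foldl (pvStep1 om f') lv with hlvF
        have huncF : lvF.get? t = none := by
          rcases hq : lvF.get? t with _ | w
          · rfl
          · have := hnew t hv (by simp [hq])
            omega
        rw [e1, hm]
        refine ⟨rfl, ?_, ?_, ?_, ?_⟩
        · exact pvExt_trans hext (pvExt_insert lvF t _ huncF)
        · exact pvInv_insert om lvF t hinv' hkk
        · intro _
          exact PySem.Dict.get?_insert_self lvF t (pvLvl om t)
        · intro k h1 h2
          rw [PySem.Dict.get?_insert] at h2
          by_cases hkt : k = t
          · simp [hkt]
          · simp only [hkt, if_false] at h2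
            exact Nat.le_of_lt (hnew k h1 h2)
      · -- cached
        rw [pvGetLevel_cached om fuel lv t v (by omega) hkk hv]
        obtain ⟨_, hval⟩ := hinv t v hv
        refine ⟨hval, pvExt_refl lv, hinv, ?_, ?_⟩
        · intro _; rw [show ((lv, v).1) = lv from rfl, hv, hval]
        · intro k h1 h2; rw [show ((lv, v).1) = lv from rfl, h1] at h2; simp at h2

-- fuel does not matter once it exceeds the rank
theorem pvGetLevel_fuelirrel (om : pvOMT) (hex : pvHex om)
    (hN : pvRemaining om om.keys om.keys.length = []) :
    ∀ n t, pvRank om hex t ≤ n → ∀ f g lv, pvInv om lv →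
      pvRank om hex t + 2 ≤ f → pvRank om hex t + 2 ≤ g →
      pvGetLevel om f lv t = pvGetLevel om g lv t := by
  intro n
  induction n with
  | zero =>
    intro t hn f g lv hinv hf hg
    rcases hw : om.get? t with _ | s
    · rw [pvGetLevel_nonkey om f lv t (by omega) hw,
        pvGetLevel_nonkey om g lv t (by omega) hw]
    · have ht : t ∈ om.keys := (pvKey_iff om t).mp (by simp [hw])
      have := pvRank_pos om hex t ht
      omega
  | succ n ih =>
    intro t hn f g lv hinv hf hg
    rcases hw : om.get? t with _ | s
    · rw [pvGetLevel_nonkey om f lv t (by omega) hw,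
        pvGetLevel_nonkey om g lv t (by omega) hw]
    · have hkk : (om.get? t).isSome = true := by simp [hw]
      have ht : t ∈ om.keys := (pvKey_iff om t).mp hkk
      rcases hv : lv.get? t with _ | v
      · obtain ⟨f', rfl⟩ : ∃ f', f = f' + 1 := ⟨f - 1, by omega⟩
        obtain ⟨g', rfl⟩ : ∃ g', g = g' + 1 := ⟨g - 1, by omega⟩
        rw [pvGetLevel_uncached om f' lv t hkk hv, pvGetLevel_uncached om g' lv t hkk hv]
        have hfold : ∀ L0 : List Int, (∀ i ∈ L0, i ∈ pvInsOf om t) → ∀ q : PySem.Dict Int Int × Option Int,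
            pvInv om q.1 →
            L0.foldl (pvPairStep om f') q = L0.foldl (pvPairStep om g') q := by
          intro L0
          induction L0 with
          | nil => intro _ _ _; rfl
          | cons i L ihL =>
            intro hsub q hinvq
            have hi : i ∈ pvInsOf om t := hsub i List.mem_cons_self
            have hlt : pvRank om hex i < pvRank om hex t := pvRank_edge om hex t i ht hi
            have hstep : pvGetLevel om f' q.1 i = pvGetLevel om g' q.1 i :=
              ih i (by omega) f' g' q.1 hinvq (by omega) (by omega)
            have hinv' : pvInv om (pvGetLevel om f' q.1 i).1 :=
              (pvGA_all om hex hN (pvRank om hex i) i le_rfl f' q.1 hinvq (by omega)).2.2.1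
            rw [List.foldl_cons, List.foldl_cons]
            rw [show pvPairStep om g' q i = pvPairStep om f' q i by
              simp [pvPairStep, hstep]]
            exact ihL (fun j hj => hsub j (List.mem_cons_of_mem i hj)) _
              (by simpa [pvPairStep] using hinv')
        rw [hfold (pvInsOf om t) (fun j hj => hj) (lv, none) hinv]
      · rw [pvGetLevel_cached om f lv t v (by omega) hkk hv,
          pvGetLevel_cached om g lv t v (by omega) hkk hv]

-- ---- skipping cached / raw entries in the inner fold ----

theorem pvFoldSkip (om : pvOMT) (hex : pvHex om) (f : Nat) (lv : PySem.Dict Int Int)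
    (L0 : List Int)
    (HIf : ∀ i ∈ L0, ∀ lv1, pvInv om lv1 → pvGA om hex lv1 (pvGetLevel om f lv1 i) i)
    (hf1 : 1 ≤ f) :
    ∀ lv0, pvInv om lv0 → pvExt lv lv0 →
      L0.foldl (pvStep1 om f) lv0 =
        (L0.filter (fun i => (om.get? i).isSome && (lv.get? i).isNone)).foldl
          (pvStep1 om f) lv0 := by
  induction L0 with
  | nil => intro lv0 _ _; rfl
  | cons i L ih =>
    intro lv0 hinv hext
    by_cases hp : ((om.get? i).isSome && (lv.get? i).isNone) = true
    · rw [List.foldl_cons,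
        show List.filter (fun j => (om.get? j).isSome && (lv.get? j).isNone) (i :: L)
          = i :: List.filter (fun j => (om.get? j).isSome && (lv.get? j).isNone) L from by
            simp [hp], List.foldl_cons]
      obtain ⟨_, hext', hinv', _, _⟩ := HIf i List.mem_cons_self lv0 hinv
      exact ih (fun j hj => HIf j (List.mem_cons_of_mem i hj)) _ hinv'
        (pvExt_trans hext hext')
    · rw [List.foldl_cons,
        show List.filter (fun j => (om.get? j).isSome && (lv.get? j).isNone) (i :: L)
          = List.filter (fun j => (om.get? j).isSome && (lv.get? j).isNone) L from by
            simp [hp]]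
      have hnoop : pvStep1 om f lv0 i = lv0 := by
        rw [Bool.and_eq_true, not_and_or] at hp
        rcases hp with hp | hp
        · have : om.get? i = none := by
            rcases hq : om.get? i with _ | w
            · rfl
            · rw [hq] at hp; simp at hp
          exact pvGetLevel_noop om f lv0 i (by omega) (Or.inl this)
        · obtain ⟨v, hv⟩ : ∃ v, lv.get? i = some v := by
            rcases hq : lv.get? i with _ | w
            · rw [hq] at hp; simp at hp
            · exact ⟨w, rfl⟩
          exact pvGetLevel_noop om f lv0 i (by omega)
            (Or.inr (by rw [hext i v hv]; rfl))
      rw [hnoop]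
      exact ih (fun j hj => HIf j (List.mem_cons_of_mem i hj)) lv0 hinv hext

-- ---- properties of the dictionary-only fold ----

theorem pvFold1Props (om : pvOMT) (hex : pvHex om) (f : Nat) (L0 : List Int)
    (HIf : ∀ i ∈ L0, ∀ lv1, pvInv om lv1 → pvGA om hex lv1 (pvGetLevel om f lv1 i) i) :
    ∀ lv0, pvInv om lv0 →
      pvExt lv0 (L0.foldl (pvStep1 om f) lv0) ∧
      pvInv om (L0.foldl (pvStep1 om f) lv0) ∧
      (∀ k, lv0.get? k = none →
        ((L0.foldl (pvStep1 om f) lv0).get? k).isSome = true →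
        ∃ i ∈ L0, pvRank om hex k ≤ pvRank om hex i) ∧
      (∀ i ∈ L0, (om.get? i).isSome = true →
        (L0.foldl (pvStep1 om f) lv0).get? i = some (pvLvl om i)) := by
  induction L0 with
  | nil =>
    intro lv0 hinv
    refine ⟨pvExt_refl lv0, hinv, ?_, ?_⟩
    · intro k h1 h2
      simp only [List.foldl_nil] at h2
      rw [h1] at h2; simp at h2
    · intro i hi; simp at hi
  | cons i L ih =>
    intro lv0 hinv
    obtain ⟨_, hext', hinv', hcach', hnew'⟩ := HIf i List.mem_cons_self lv0 hinv
    obtain ⟨hext2, hinv2, hnew2, hcach2⟩ :=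
      ih (fun j hj => HIf j (List.mem_cons_of_mem i hj)) (pvStep1 om f lv0 i) hinv'
    rw [List.foldl_cons]
    refine ⟨pvExt_trans hext' hext2, hinv2, ?_, ?_⟩
    · intro k h1 h2
      rcases hmid : (pvStep1 om f lv0 i).get? k with _ | w
      · obtain ⟨j, hj, hle⟩ := hnew2 k hmid h2
        exact ⟨j, List.mem_cons_of_mem i hj, hle⟩
      · exact ⟨i, List.mem_cons_self, hnew' k h1 (by rw [show (pvGetLevel om f lv0 i).1.get? k = some w from hmid]; rfl)⟩
    · intro j hj hkey
      rcases List.mem_cons.mp hj with rfl | hj'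
      · have := hcach' hkey
        exact hext2 j (pvLvl om j) this
      · exact hcach2 j hj' hkey

-- the dictionary-only fold does not depend on the fuel, once large enough
theorem pvFold1_fuelirrel (om : pvOMT) (hex : pvHex om)
    (hN : pvRemaining om om.keys om.keys.length = []) (L0 : List Int) (f g : Nat)
    (hf : ∀ i ∈ L0, pvRank om hex i + 2 ≤ f) (hg : ∀ i ∈ L0, pvRank om hex i + 2 ≤ g) :
    ∀ lv0, pvInv om lv0 →
      L0.foldl (pvStep1 om f) lv0 = L0.foldl (pvStep1 om g) lv0 := by
  induction L0 with
  | nil => intro lv0 _; rfl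
  | cons i L ih =>
    intro lv0 hinv
    have hstep : pvGetLevel om f lv0 i = pvGetLevel om g lv0 i :=
      pvGetLevel_fuelirrel om hex hN (pvRank om hex i) i le_rfl f g lv0 hinv
        (hf i List.mem_cons_self) (hg i List.mem_cons_self)
    have hinv' : pvInv om (pvStep1 om f lv0 i) :=
      (pvGA_all om hex hN (pvRank om hex i) i le_rfl f lv0 hinv
        (hf i List.mem_cons_self)).2.2.1
    rw [List.foldl_cons, List.foldl_cons,
      show pvStep1 om g lv0 i = pvStep1 om f lv0 i by simp [pvStep1, hstep]]
    exact ih (fun j hj => hf j (List.mem_cons_of_mem i hj))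
      (fun j hj => hg j (List.mem_cons_of_mem i hj)) _ hinv'

-- ---- one-step unfolding of port B's loop ----

theorem pvRunStack_nil (om : pvOMT) (fuel : Nat) (lv : PySem.Dict Int Int) :
    pvRunStack om fuel lv [] = lv := by cases fuel <;> rfl

theorem pvRunStack_skip (om : pvOMT) (f : Nat) (lv : PySem.Dict Int Int) (t : Int)
    (rest : List Int) (h : ((om.get? t).isNone || (lv.get? t).isSome) = true) :
    pvRunStack om (f+1) lv (t :: rest) = pvRunStack om f lv rest := by
  simp [pvRunStack, h]

theorem pvRunStack_resolve (om : pvOMT) (f : Nat) (lv : PySem.Dict Int Int) (t : Int)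
    (rest : List Int)
    (h1 : (om.get? t).isNone = false) (h2 : (lv.get? t).isSome = false)
    (hpend : (pvInsOf om t).filter
        (fun i => (om.get? i).isSome && (lv.get? i).isNone) = []) :
    pvRunStack om (f+1) lv (t :: rest) =
      pvRunStack om f
        (lv.insert t ((PySem.List.max?
            ((pvInsOf om t).map (fun i => if (om.get? i).isSome = true then lv.getD i 0 else 0))
            (fun y => y)).getD 0 + 1)) rest := by
  simp [pvRunStack, h1, h2, hpend]

theorem pvRunStack_push (om : pvOMT) (f : Nat) (lv : PySem.Dict Int Int) (t : Int)
    (rest : List Int)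
    (h1 : (om.get? t).isNone = false) (h2 : (lv.get? t).isSome = false)
    (hpend : ((pvInsOf om t).filter
        (fun i => (om.get? i).isSome && (lv.get? i).isNone)).isEmpty = false) :
    pvRunStack om (f+1) lv (t :: rest) =
      pvRunStack om f lv
        (((pvInsOf om t).filter (fun i => (om.get? i).isSome && (lv.get? i).isNone))
          ++ t :: rest) := by
  simp [pvRunStack, h1, h2, hpend]

-- ---- processing a block of stack entries one after the other ----

theorem pvChain (om : pvOMT) (hex : pvHex om) (b F : Nat) (L0 : List Int)
    (HB : ∀ i ∈ L0, ∀ lv, pvInv om lv → ∃ k, 1 ≤ k ∧ k ≤ b ^ (pvRank om hex i + 1) ∧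
      ∀ rest fuel, k ≤ fuel →
        pvRunStack om fuel lv (i :: rest) =
          pvRunStack om (fuel - k) (pvStep1 om F lv i) rest)
    (HIf : ∀ i ∈ L0, ∀ lv1, pvInv om lv1 → pvGA om hex lv1 (pvGetLevel om F lv1 i) i) :
    ∀ lv, pvInv om lv → ∃ K,
      K ≤ (L0.map (fun i => b ^ (pvRank om hex i + 1))).sum ∧
      ∀ rest fuel, K ≤ fuel →
        pvRunStack om fuel lv (L0 ++ rest) =
          pvRunStack om (fuel - K) (L0.foldl (pvStep1 om F) lv) rest := by
  induction L0 with
  | nil =>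
    intro lv _
    exact ⟨0, Nat.zero_le _, fun rest fuel _ => by simp⟩
  | cons i L ih =>
    intro lv hinv
    obtain ⟨k, hk1, hkb, hkrun⟩ := HB i List.mem_cons_self lv hinv
    have hinv' : pvInv om (pvStep1 om F lv i) :=
      (HIf i List.mem_cons_self lv hinv).2.2.1
    obtain ⟨K, hKb, hKrun⟩ := ih (fun j hj => HB j (List.mem_cons_of_mem i hj))
      (fun j hj => HIf j (List.mem_cons_of_mem i hj)) (pvStep1 om F lv i) hinv'
    refine ⟨k + K, ?_, ?_⟩
    · simp only [List.map_cons, List.sum_cons]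
      omega
    · intro rest fuel hfuel
      rw [List.cons_append, hkrun (L ++ rest) fuel (by omega),
        hKrun rest (fuel - k) (by omega), List.foldl_cons]
      congr 1
      omega

-- the resolving step writes exactly the intrinsic level
theorem pvMofCached (om : pvOMT) (hex : pvHex om)
    (hN : pvRemaining om om.keys om.keys.length = []) (t : Int) (ht : t ∈ om.keys)
    (lvX : PySem.Dict Int Int) (hinvX : pvInv om lvX)
    (hcach : ∀ i ∈ pvInsOf om t, (om.get? i).isSome = true → ∃ v, lvX.get? i = some v) :
    (PySem.List.max?
        ((pvInsOf om t).map (fun i => if (om.get? i).isSome = true then lvX.getD i 0 else 0))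
        (fun y => y)).getD 0 + 1 = pvLvl om t := by
  have hmap : (pvInsOf om t).map
      (fun i => if (om.get? i).isSome = true then lvX.getD i 0 else 0)
      = (pvInsOf om t).map (pvLvl om) := by
    apply List.map_congr_left
    intro i hi
    by_cases hk : (om.get? i).isSome = true
    · obtain ⟨v, hv⟩ := hcach i hi hk
      obtain ⟨_, hval⟩ := hinvX i v hv
      rw [if_pos hk, PySem.Dict.getD_eq_get?_getD, hv]
      simpa using hval
    · have hnone : om.get? i = none := by
        rcases hq : om.get? i with _ | w
        · rfl
        · rw [hq] at hk; simp at hk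
      rw [if_neg hk, pvLvl_nonkey om i hnone]
  rw [hmap]
  have := pvLvl_eq om hex hN t ht
  unfold pvMaxL at this
  omega

theorem pvBlock_all (om : pvOMT) (hex : pvHex om)
    (hN : pvRemaining om om.keys om.keys.length = [])
    (b F : Nat) (hb : 2 ≤ b)
    (hins : ∀ u : Int, (om.get? u).isSome = true → (pvInsOf om u).length + 2 ≤ b)
    (hF : ∀ u : Int, pvRank om hex u + 2 ≤ F) :
    ∀ n (t : Int), pvRank om hex t ≤ n → ∀ lv, pvInv om lv →
      ∃ k, 1 ≤ k ∧ k ≤ b ^ (pvRank om hex t + 1) ∧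
        ∀ rest fuel, k ≤ fuel →
          pvRunStack om fuel lv (t :: rest) =
            pvRunStack om (fuel - k) (pvStep1 om F lv t) rest := by
  have hF2 : 2 ≤ F := by have := hF 0; omega
  intro n
  induction n with
  | zero =>
    intro t hn lv hinv
    by_cases hskip : ((om.get? t).isNone || (lv.get? t).isSome) = true
    · refine ⟨1, le_rfl, Nat.one_le_pow _ _ (by omega), ?_⟩
      intro rest fuel hfuel
      obtain ⟨f, rfl⟩ : ∃ f, fuel = f + 1 := ⟨fuel - 1, by omega⟩
      rw [pvRunStack_skip om f lv t rest hskip]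
      have hnoop : pvStep1 om F lv t = lv := by
        apply pvGetLevel_noop om F lv t (by omega)
        rcases Bool.or_eq_true_iff.mp hskip with h | h
        · exact Or.inl (Option.isNone_iff_eq_none.mp h)
        · exact Or.inr h
      rw [hnoop]
      congr 1
    · -- an uncached key has positive rank, impossible at n = 0
      have h1 : (om.get? t).isNone = false := by
        rcases hq : om.get? t with _ | w
        · simp [hq] at hskip
        · simp
      have hkey : (om.get? t).isSome = true := by
        rcases hq : om.get? t with _ | w
        · rw [hq] at h1; simp at h1
        · simp
      have ht : t ∈ om.keys := (pvKey_iff om t).mp hkey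
      have := pvRank_pos om hex t ht
      omega
  | succ n ih =>
    intro t hn lv hinv
    by_cases hskip : ((om.get? t).isNone || (lv.get? t).isSome) = true
    · refine ⟨1, le_rfl, Nat.one_le_pow _ _ (by omega), ?_⟩
      intro rest fuel hfuel
      obtain ⟨f, rfl⟩ : ∃ f, fuel = f + 1 := ⟨fuel - 1, by omega⟩
      rw [pvRunStack_skip om f lv t rest hskip]
      have hnoop : pvStep1 om F lv t = lv := by
        apply pvGetLevel_noop om F lv t (by omega)
        rcases Bool.or_eq_true_iff.mp hskip with h | h
        · exact Or.inl (Option.isNone_iff_eq_none.mp h)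
        · exact Or.inr h
      rw [hnoop]
      congr 1
    · have h1 : (om.get? t).isNone = false := by
        rcases hq : om.get? t with _ | w
        · simp [hq] at hskip
        · simp
      have h2 : (lv.get? t).isSome = false := by
        rcases hq : lv.get? t with _ | w
        · simp
        · simp [hq] at hskip
      have hkey : (om.get? t).isSome = true := by
        rcases hq : om.get? t with _ | w
        · rw [hq] at h1; simp at h1
        · simp
      have hv : lv.get? t = none := by
        rcases hq : lv.get? t with _ | w
        · rfl
        · rw [hq] at h2; simp at h2
      have ht : t ∈ om.keys := (pvKey_iff om t).mp hkey
      have hrkpos : 1 ≤ pvRank om hex t := pvRank_pos om hex t ht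
      have hrk : ∀ i ∈ pvInsOf om t, pvRank om hex i < pvRank om hex t :=
        fun i hi => pvRank_edge om hex t i ht hi
      have HIfF : ∀ i ∈ pvInsOf om t, ∀ lv1, pvInv om lv1 →
          pvGA om hex lv1 (pvGetLevel om F lv1 i) i :=
        fun i hi lv1 hinv1 =>
          pvGA_all om hex hN (pvRank om hex i) i le_rfl F lv1 hinv1 (hF i)
      -- the A side: resolving t appends (t, level t) after resolving its pending inputs
      have hAside : pvStep1 om F lv t =
          (((pvInsOf om t).filter
              (fun i => (om.get? i).isSome && (lv.get? i).isNone)).foldl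
            (pvStep1 om F) lv).insert t (pvLvl om t) := by
        obtain ⟨F', rfl⟩ : ∃ F', F = F' + 1 := ⟨F - 1, by omega⟩
        have HIf' : ∀ i ∈ pvInsOf om t, ∀ lv1, pvInv om lv1 →
            pvGA om hex lv1 (pvGetLevel om F' lv1 i) i := by
          intro i hi lv1 hinv1
          have := hrk i hi
          have := hF t
          exact pvGA_all om hex hN (pvRank om hex i) i le_rfl F' lv1 hinv1 (by omega)
        show (pvGetLevel om (F' + 1) lv t).1 = _
        rw [pvGetLevel_uncached om F' lv t hkey hv]
        obtain ⟨e1, e2, _, _, _⟩ :=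
          pvGAfold om hex F' (pvInsOf om t) HIf' (pvRank om hex t) hrk lv none hinv
        have hm : (((pvInsOf om t).foldl (pvPairStep om F') (lv, none)).2).getD 0 + 1
            = pvLvl om t := by
          rw [e2, pvRunMax_none]
          have := pvLvl_eq om hex hN t ht
          omega
        show (((pvInsOf om t).foldl (pvPairStep om F') (lv, none)).1).insert t _ = _
        rw [e1, hm]
        congr 1
        rw [pvFoldSkip om hex F' lv (pvInsOf om t) HIf' (by omega) lv hinv (pvExt_refl lv)]
        apply pvFold1_fuelirrel om hex hN _ F' (F' + 1) _ _ lv hinv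
        · intro i hi
          have := hrk i (List.mem_of_mem_filter hi)
          have := hF t
          omega
        · intro i hi
          exact hF i
      by_cases hpe : ((pvInsOf om t).filter
          (fun i => (om.get? i).isSome && (lv.get? i).isNone)).isEmpty = true
      · -- all inputs already resolved: one resolving step
        have hpnil : (pvInsOf om t).filter
            (fun i => (om.get? i).isSome && (lv.get? i).isNone) = [] :=
          List.isEmpty_iff.mp hpe
        refine ⟨1, le_rfl, Nat.one_le_pow _ _ (by omega), ?_⟩
        intro rest fuel hfuel
        obtain ⟨f, rfl⟩ : ∃ f, fuel = f + 1 := ⟨fuel - 1, by omega⟩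
        rw [pvRunStack_resolve om f lv t rest h1 h2 hpnil]
        have hcach : ∀ i ∈ pvInsOf om t, (om.get? i).isSome = true →
            ∃ v, lv.get? i = some v := by
          intro i hi hk
          have := List.filter_eq_nil_iff.mp hpnil i hi
          rcases hq : lv.get? i with _ | w
          · exact absurd (by simp [hk, hq]) this
          · exact ⟨w, rfl⟩
        rw [pvMofCached om hex hN t ht lv hinv hcach, hAside, hpnil]
        congr 1
      · -- push the pending inputs, resolve them, then resolve t
        have hpef : ((pvInsOf om t).filter
            (fun i => (om.get? i).isSome && (lv.get? i).isNone)).isEmpty = false := by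
          simpa using hpe
        have HB : ∀ i ∈ (pvInsOf om t).filter
            (fun i => (om.get? i).isSome && (lv.get? i).isNone), ∀ lv1, pvInv om lv1 →
            ∃ k, 1 ≤ k ∧ k ≤ b ^ (pvRank om hex i + 1) ∧
              ∀ rest fuel, k ≤ fuel →
                pvRunStack om fuel lv1 (i :: rest) =
                  pvRunStack om (fuel - k) (pvStep1 om F lv1 i) rest := by
          intro i hi lv1 hinv1
          have := hrk i (List.mem_of_mem_filter hi)
          exact ih i (by omega) lv1 hinv1
        have HIfP : ∀ i ∈ (pvInsOf om t).filter
            (fun i => (om.get? i).isSome && (lv.get? i).isNone), ∀ lv1, pvInv om lv1 →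
            pvGA om hex lv1 (pvGetLevel om F lv1 i) i :=
          fun i hi => HIfF i (List.mem_of_mem_filter hi)
        obtain ⟨K, hKb, hKrun⟩ := pvChain om hex b F _ HB HIfP lv hinv
        have hX : 1 ≤ b ^ (pvRank om hex t) := Nat.one_le_pow _ _ (by omega)
        have hkbound : K + 2 ≤ b ^ (pvRank om hex t + 1) := by
          have hsum : ((((pvInsOf om t).filter
              (fun i => (om.get? i).isSome && (lv.get? i).isNone))).map
              (fun i => b ^ (pvRank om hex i + 1))).sum
              ≤ ((pvInsOf om t).filter
                  (fun i => (om.get? i).isSome && (lv.get? i).isNone)).length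
                * b ^ (pvRank om hex t) := by
            have := List.sum_le_card_nsmul
              ((((pvInsOf om t).filter
                (fun i => (om.get? i).isSome && (lv.get? i).isNone))).map
                (fun i => b ^ (pvRank om hex i + 1))) (b ^ (pvRank om hex t)) ?_
            · simpa [smul_eq_mul] using this
            · intro x hx
              obtain ⟨i, hi, rfl⟩ := List.mem_map.mp hx
              have := hrk i (List.mem_of_mem_filter hi)
              exact Nat.pow_le_pow_right (by omega) (by omega)
          have hlen : ((pvInsOf om t).filter
              (fun i => (om.get? i).isSome && (lv.get? i).isNone)).length ≤ b - 2 := by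
            have := List.length_filter_le
              (fun i => (om.get? i).isSome && (lv.get? i).isNone) (pvInsOf om t)
            have := hins t hkey
            omega
          have hmul : ((pvInsOf om t).filter
              (fun i => (om.get? i).isSome && (lv.get? i).isNone)).length
                * b ^ (pvRank om hex t) ≤ (b - 2) * b ^ (pvRank om hex t) :=
            Nat.mul_le_mul_right _ hlen
          have he : (b - 2) * b ^ (pvRank om hex t) + 2 * b ^ (pvRank om hex t)
              = b ^ (pvRank om hex t + 1) := by
            rw [← Nat.add_mul, pow_succ]
            rw [Nat.sub_add_cancel hb, Nat.mul_comm]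
          omega
        refine ⟨K + 2, by omega, hkbound, ?_⟩
        intro rest fuel hfuel
        obtain ⟨f, rfl⟩ : ∃ f, fuel = f + 1 := ⟨fuel - 1, by omega⟩
        rw [pvRunStack_push om f lv t rest h1 h2 hpef]
        rw [hKrun (t :: rest) f (by omega)]
        obtain ⟨hextP, hinvP, hnewP, hcachP⟩ :=
          pvFold1Props om hex F _ HIfP lv hinv
        have hvP : (((pvInsOf om t).filter
            (fun i => (om.get? i).isSome && (lv.get? i).isNone)).foldl
              (pvStep1 om F) lv).get? t = none := by
          rcases hq : (((pvInsOf om t).filter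
              (fun i => (om.get? i).isSome && (lv.get? i).isNone)).foldl
                (pvStep1 om F) lv).get? t with _ | w
          · rfl
          · obtain ⟨i, hi, hle⟩ := hnewP t hv (by simp [hq])
            have := hrk i (List.mem_of_mem_filter hi)
            omega
        have h2P : ((((pvInsOf om t).filter
            (fun i => (om.get? i).isSome && (lv.get? i).isNone)).foldl
              (pvStep1 om F) lv).get? t).isSome = false := by rw [hvP]; rfl
        have hpendP : (pvInsOf om t).filter
            (fun i => (om.get? i).isSome &&
              ((((pvInsOf om t).filter
                (fun j => (om.get? j).isSome && (lv.get? j).isNone)).foldl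
                  (pvStep1 om F) lv).get? i).isNone) = [] := by
          rw [List.filter_eq_nil_iff]
          intro i hi
          by_cases hk : (om.get? i).isSome = true
          · have hsome : ∃ v, (((pvInsOf om t).filter
                (fun j => (om.get? j).isSome && (lv.get? j).isNone)).foldl
                  (pvStep1 om F) lv).get? i = some v := by
              by_cases hiv : (lv.get? i).isNone = true
              · have hip : i ∈ (pvInsOf om t).filter
                    (fun j => (om.get? j).isSome && (lv.get? j).isNone) :=
                  List.mem_filter.mpr ⟨hi, by simp [hk, hiv]⟩
                exact ⟨pvLvl om i, hcachP i hip hk⟩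
              · obtain ⟨w, hw⟩ : ∃ w, lv.get? i = some w := by
                  rcases hq : lv.get? i with _ | w
                  · rw [hq] at hiv; simp at hiv
                  · exact ⟨w, rfl⟩
                exact ⟨w, hextP i w hw⟩
            obtain ⟨v, hvv⟩ := hsome
            simp [hvv]
          · simp [Bool.and_eq_true]
            intro h
            exact absurd h hk
        have hcachPP : ∀ i ∈ pvInsOf om t, (om.get? i).isSome = true →
            ∃ v, (((pvInsOf om t).filter
              (fun j => (om.get? j).isSome && (lv.get? j).isNone)).foldl
                (pvStep1 om F) lv).get? i = some v := by
          intro i hi hk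
          have := List.filter_eq_nil_iff.mp hpendP i hi
          rcases hq : (((pvInsOf om t).filter
              (fun j => (om.get? j).isSome && (lv.get? j).isNone)).foldl
                (pvStep1 om F) lv).get? i with _ | w
          · exact absurd (by simp [hk, hq]) this
          · exact ⟨w, rfl⟩
        obtain ⟨f', hf'⟩ : ∃ f', f - K = f' + 1 := ⟨f - K - 1, by omega⟩
        rw [hf', pvRunStack_resolve om f' _ t rest h1 h2P hpendP]
        rw [pvMofCached om hex hN t ht _ hinvP hcachPP, hAside]
        congr 1
        omega

-- ---- facts about the output map ----

theorem pvOM_val_mem (l : List (List (String × List Int))) :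
    ∀ (d : pvOMT) (k : Int) (s' : List (String × List Int)),
      (l.foldl (fun d s => d.insert (pvOutKey s) s) d).get? k = some s' →
      s' ∈ l ∨ d.get? k = some s' := by
  induction l with
  | nil => intro d k s' h; exact Or.inr h
  | cons s l ih =>
    intro d k s' h
    rcases ih (d.insert (pvOutKey s) s) k s' h with hmem | hget
    · exact Or.inl (List.mem_cons_of_mem s hmem)
    · rw [PySem.Dict.get?_insert] at hget
      by_cases hk : k = pvOutKey s
      · rw [if_pos hk] at hget
        obtain rfl : s = s' := Option.some_inj.mp hget
        exact Or.inl List.mem_cons_self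
      · rw [if_neg hk] at hget
        exact Or.inr hget

theorem pvOM_keys_len (l : List (List (String × List Int))) :
    ∀ d : pvOMT,
      ((l.foldl (fun d s => d.insert (pvOutKey s) s) d).keys).length
        ≤ d.keys.length + l.length := by
  induction l with
  | nil => intro d; simp
  | cons s l ih =>
    intro d
    have h1 : ((d.insert (pvOutKey s) s).keys).length ≤ d.keys.length + 1 := by
      by_cases hc : d.contains (pvOutKey s) = true
      · rw [PySem.Dict.keys_insert_of_contains _ _ hc]
        omega
      · rw [PySem.Dict.keys_insert_of_not_contains _ _ (by simpa using hc)]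
        simp
    have := ih (d.insert (pvOutKey s) s)
    simp only [List.foldl_cons, List.length_cons]
    omega

-- ---- the two outer loops produce the same levels dictionary ----

theorem pvOuter (om : pvOMT) (hex : pvHex om)
    (hN : pvRemaining om om.keys om.keys.length = [])
    (b F : Nat) (hb : 2 ≤ b)
    (hins : ∀ u : Int, (om.get? u).isSome = true → (pvInsOf om u).length + 2 ≤ b)
    (hF : ∀ u : Int, pvRank om hex u + 2 ≤ F)
    (fuelB : Nat) (hfB : ∀ u : Int, b ^ (pvRank om hex u + 1) ≤ fuelB) :
    ∀ (l : List (List (String × List Int))) (lv : PySem.Dict Int Int), pvInv om lv →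
      l.foldl (fun lv s => (pvGetLevel om F lv (pvOutKey s)).1) lv
        = l.foldl (fun lv s => pvRunStack om fuelB lv [pvOutKey s]) lv := by
  intro l
  induction l with
  | nil => intro lv _; rfl
  | cons s l ih =>
    intro lv hinv
    obtain ⟨k, hk1, hkb, hkrun⟩ :=
      pvBlock_all om hex hN b F hb hins hF (pvRank om hex (pvOutKey s)) (pvOutKey s)
        le_rfl lv hinv
    have hrun : pvRunStack om fuelB lv [pvOutKey s] = pvStep1 om F lv (pvOutKey s) := by
      have := hkrun [] fuelB (le_trans hkb (hfB (pvOutKey s)))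
      rw [pvRunStack_nil] at this
      exact this
    have hinv' : pvInv om (pvStep1 om F lv (pvOutKey s)) :=
      (pvGA_all om hex hN (pvRank om hex (pvOutKey s)) (pvOutKey s) le_rfl F lv hinv
        (hF (pvOutKey s))).2.2.1
    simp only [List.foldl_cons, hrun]
    exact ih (pvStep1 om F lv (pvOutKey s)) hinv'

-- ===== VERDICT (by name: the statement is the Claim_ definition above) =====
theorem determine_levels_spec : Claim_equal_determine_levels := by
  intro schematics _ hpre
  obtain ⟨hp1, hp2, hN⟩ := hpre
  unfold Spec_determine_levels
  have hex : pvHex (pvOutputMap schematics) := by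
    intro k
    exact ⟨(pvOutputMap schematics).keys.length, by rw [hN]; rfl⟩
  have hb : 2 ≤ 2 + (schematics.map (fun s => (pvIns s).length)).sum := by omega
  have hins : ∀ u : Int, ((pvOutputMap schematics).get? u).isSome = true →
      (pvInsOf (pvOutputMap schematics) u).length + 2
        ≤ 2 + (schematics.map (fun s => (pvIns s).length)).sum := by
    intro u hu
    obtain ⟨s', hs'⟩ : ∃ s', (pvOutputMap schematics).get? u = some s' := by
      rcases hq : (pvOutputMap schematics).get? u with _ | w
      · rw [hq] at hu; simp at hu
      · exact ⟨w, rfl⟩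
    have hmem : s' ∈ schematics := by
      rcases pvOM_val_mem schematics PySem.Dict.empty u s' hs' with h | h
      · exact h
      · rw [PySem.Dict.get?_empty] at h; cases h
    have hle : (pvIns s').length ≤ (schematics.map (fun s => (pvIns s).length)).sum :=
      List.single_le_sum (fun _ _ => Nat.zero_le _) _
        (List.mem_map.mpr ⟨s', hmem, rfl⟩)
    have heq : pvInsOf (pvOutputMap schematics) u = pvIns s' := by
      unfold pvInsOf
      rw [hs']
    rw [heq]
    omega
  have hF : ∀ u : Int, pvRank (pvOutputMap schematics) hex u + 2 ≤ schematics.length + 2 := by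
    intro u
    have h1 := pvRank_le (pvOutputMap schematics) hex hN u
    have h2 : ((pvOutputMap schematics).keys).length ≤ schematics.length := by
      have := pvOM_keys_len schematics PySem.Dict.empty
      simpa [pvOutputMap] using this
    omega
  have hfB : ∀ u : Int,
      (2 + (schematics.map (fun s => (pvIns s).length)).sum) ^
          (pvRank (pvOutputMap schematics) hex u + 1)
        ≤ pvFuelB schematics := by
    intro u
    unfold pvFuelB
    apply Nat.pow_le_pow_right (by omega)
    have h1 := pvRank_le (pvOutputMap schematics) hex hN u
    have h2 : ((pvOutputMap schematics).keys).length ≤ schematics.length := by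
      have := pvOM_keys_len schematics PySem.Dict.empty
      simpa [pvOutputMap] using this
    omega
  have hinv0 : pvInv (pvOutputMap schematics) PySem.Dict.empty := by
    intro k v h
    rw [PySem.Dict.get?_empty] at h
    cases h
  have hmain := pvOuter (pvOutputMap schematics) hex hN
    (2 + (schematics.map (fun s => (pvIns s).length)).sum) (schematics.length + 2)
    hb hins hF (pvFuelB schematics) hfB schematics PySem.Dict.empty hinv0
  show (schematics.foldl
      (fun lv s => (pvGetLevel (pvOutputMap schematics) (schematics.length + 2) lv
        (pvOutKey s)).1) PySem.Dict.empty).items = _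
  rw [hmain]
  rfl
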